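-- pv_equiv track=rewrite | github.com/ekvll/effektprognoser | effektprognoser/plot_rutid/main.py | get_nrows
-- ===== SOURCE A (Python) =====
-- def get_nrows(indata):
--     ncols = []
--     for _, data in indata.items():
--         ncols.append(len(data))
--     if len(set(ncols)) == 1:
--         ncols = list(set(ncols))[0]
--         return ncols
--     else:
--         return max(ncols)
-- ===== SOURCE B (Python) =====
-- def get_nrows(indata):
--     lengths = sorted(len(data) for data in indata.values())
--     return lengths[-1]
-- ===== Notes on version B (the rewrite author's own statement) =====
-- stated objective: alternative
-- what changed: Replaces A's list+set uniformity branch and running max with a sort-then-take-last strategy: B sorts the value lengths ascending and returns the last element (which is the common value when all lengths agree and the maximum otherwise).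
import Mathlib
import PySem

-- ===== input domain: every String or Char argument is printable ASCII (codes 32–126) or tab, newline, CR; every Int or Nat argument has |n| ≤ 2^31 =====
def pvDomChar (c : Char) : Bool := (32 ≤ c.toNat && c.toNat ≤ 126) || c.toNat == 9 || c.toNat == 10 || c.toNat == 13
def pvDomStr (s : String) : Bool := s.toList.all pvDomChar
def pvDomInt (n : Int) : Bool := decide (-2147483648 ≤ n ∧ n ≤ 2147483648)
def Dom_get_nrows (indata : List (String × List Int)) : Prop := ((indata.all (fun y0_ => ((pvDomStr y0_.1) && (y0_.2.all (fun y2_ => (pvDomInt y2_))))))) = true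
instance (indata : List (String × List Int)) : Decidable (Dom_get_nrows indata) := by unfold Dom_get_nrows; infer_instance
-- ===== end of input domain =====

-- B replaces A's list+set uniformity branch with sort-then-take-last over the value
-- lengths (the last of the ascending sort is the common value when all agree, the max otherwise).


-- ===== PORT A =====
-- ncols = []; for _, data in items: ncols.append(len(data));
-- if len(set(ncols)) == 1: return list(set(ncols))[0] else: return max(ncols)
def get_nrows (indata : List (String × List Int)) : Int :=
  let ncols : List Int := indata.foldl (fun acc p => acc ++ [(p.2.length : Int)]) []
  let s : PySem.Set Int := PySem.Set.ofList ncols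
  if s.length = 1 then
    (PySem.List.pyGet? s 0).getD 0          -- list(set(ncols))[0]; guarded by len = 1, in range
  else
    (PySem.List.max? ncols (fun y => y)).getD 0   -- max(ncols); nonempty under Pre_

-- ===== PORT B =====
-- lengths = sorted(len(data) for data in indata.values()); return lengths[-1]
def get_nrows_alt (indata : List (String × List Int)) : Int :=
  let lengths : List Int :=
    PySem.List.sorted (indata.map (fun p => (p.2.length : Int))) (fun x => x) false
  (PySem.List.pyGet? lengths (-1)).getD 0   -- lengths[-1]; nonempty under Pre_ (IndexError outside)

-- ===== PRECONDITION & SPEC =====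
-- Pre_ excludes only the empty dict, on which A raises ValueError (max of empty) and B IndexError.
def Pre_get_nrows (indata : List (String × List Int)) : Prop := indata ≠ []
instance (indata : List (String × List Int)) : Decidable (Pre_get_nrows indata) := by unfold Pre_get_nrows; infer_instance
def pvWitness_get_nrows : (List (String × List Int)) := [("a", [1, 2]), ("b", [3])]
def Spec_get_nrows (indata : List (String × List Int)) (out : Int) : Prop := out = get_nrows_alt indata
instance (indata : List (String × List Int)) (out : Int) : Decidable (Spec_get_nrows indata out) := by unfold Spec_get_nrows; infer_instance

-- ===== CLAIM (what is proved, stated in full; the proofs are below) =====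
def Claim_equal_get_nrows : Prop := ∀ (indata : List (String × List Int)), Dom_get_nrows indata → Pre_get_nrows indata → Spec_get_nrows indata (get_nrows indata)

-- ===== LEMMAS AND PROOFS =====

-- all elements of a list lie in its set
lemma all_eq_of_ofList_singleton {l : List Int} {a : Int}
    (h : PySem.Set.ofList l = [a]) : ∀ x ∈ l, x = a := by
  intro x hx
  have : x ∈ PySem.Set.ofList l := (PySem.Set.mem_ofList l x).mpr hx
  rw [h] at this
  simpa using this

-- the last element of the ascending sort is an upper bound of the list
lemma getLast_sorted_isMax (l : List Int) (h : PySem.List.sorted l (fun x => x) false ≠ []) :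
    ∀ y ∈ l, y ≤ (PySem.List.sorted l (fun x => x) false).getLast h := by
  intro y hy
  have hy' : y ∈ PySem.List.sorted l (fun x => x) false :=
    (PySem.List.mem_sorted l (fun x => x) false y).mpr hy
  obtain ⟨p, hp, hpy⟩ := List.mem_iff_getElem.mp hy'
  have hlast : (PySem.List.sorted l (fun x => x) false).getLast h
      = (PySem.List.sorted l (fun x => x) false)[(PySem.List.sorted l (fun x => x) false).length - 1] :=
    List.getLast_eq_getElem h
  rw [hlast, ← hpy]
  exact PySem.List.sorted_id_getElem_mono l (by omega) (by omega)

-- the last element of the ascending sort is the value of max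
lemma getLast_sorted_eq_max (l : List Int)
    (h : PySem.List.sorted l (fun x => x) false ≠ []) (m : Int)
    (hm : PySem.List.max? l (fun y => y) = some m) :
    (PySem.List.sorted l (fun x => x) false).getLast h = m := by
  have hmem : (PySem.List.sorted l (fun x => x) false).getLast h ∈ l := by
    have := List.getLast_mem h
    exact (PySem.List.mem_sorted l (fun x => x) false _).mp this
  have h1 : (PySem.List.sorted l (fun x => x) false).getLast h ≤ m :=
    PySem.List.max?_isMax hm _ hmem
  have h2 : m ≤ (PySem.List.sorted l (fun x => x) false).getLast h :=
    getLast_sorted_isMax l h m (PySem.List.max?_mem hm)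
  omega

-- ===== VERDICT (by name: the statement is the Claim_ definition above) =====
theorem get_nrows_spec : Claim_equal_get_nrows := by
  intro indata _ hpre
  unfold Spec_get_nrows get_nrows get_nrows_alt
  simp only [PySem.List.foldl_append_singleton_eq_map, List.nil_append]
  set l : List Int := indata.map (fun p => (p.2.length : Int)) with hl
  have hlne : l ≠ [] := by
    simpa [hl, List.map_eq_nil_iff] using hpre
  have hsne : PySem.List.sorted l (fun x => x) false ≠ [] := by
    simpa [PySem.List.sorted_eq_nil_iff] using hlne
  obtain ⟨m, hm⟩ : ∃ m, PySem.List.max? l (fun y => y) = some m := by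
    cases hmx : PySem.List.max? l (fun y => y) with
    | none => exact absurd ((PySem.List.max?_eq_none_iff ..).mp hmx) hlne
    | some m => exact ⟨m, rfl⟩
  have hB : (PySem.List.pyGet? (PySem.List.sorted l (fun x => x) false) (-1)).getD 0 = m := by
    rw [PySem.List.pyGet?_neg_one, List.getLast?_eq_some_getLast hsne]
    simpa using getLast_sorted_eq_max l hsne m hm
  rw [hB]
  by_cases h1 : (PySem.Set.ofList l).length = 1
  · -- all lengths equal: set is a singleton [a], and a = m
    obtain ⟨a, ha⟩ : ∃ a, PySem.Set.ofList l = [a] := by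
      match hset : PySem.Set.ofList l, h1 with
      | [a], _ => exact ⟨a, rfl⟩
    have hall := all_eq_of_ofList_singleton ha
    have hma : m = a := hall m (PySem.List.max?_mem hm)
    rw [if_pos h1, ha, hma]
    rfl
  · rw [if_neg h1, hm]
    rfl
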